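-- pv_equiv track=rewrite | github.com/burhan11/soft-computing | max_one.py | fit_sort
-- ===== SOURCE A (Python) =====
-- def cal_fitness(a):
--   s=a.count('1')
--   return s
--
-- def fit_sort(array):
--   for i in range(len(array)):
--     for j in range(len(array)-1):
--       if(cal_fitness(array[j])<cal_fitness(array[j+1])):
--            temp=array[j]
--            array[j]=array[j+1]
--            array[j+1]=temp
--
--   return array
-- ===== SOURCE B (Python) =====
-- def fit_sort(array):
--     keys = sorted({s.count('1') for s in array}, reverse=True)
--     array[:] = [s for k in keys for s in array if s.count('1') == k]
--     return array
-- ===== Notes on version B (the rewrite author's own statement) =====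
-- stated objective: faster
-- what changed: Replaces A's repeated adjacent-swap bubble passes (n full passes over the list) by a stable key-bucket sort: compute the distinct '1'-counts, sort those keys once descending, and emit each key's elements in original order.
import Mathlib
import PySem

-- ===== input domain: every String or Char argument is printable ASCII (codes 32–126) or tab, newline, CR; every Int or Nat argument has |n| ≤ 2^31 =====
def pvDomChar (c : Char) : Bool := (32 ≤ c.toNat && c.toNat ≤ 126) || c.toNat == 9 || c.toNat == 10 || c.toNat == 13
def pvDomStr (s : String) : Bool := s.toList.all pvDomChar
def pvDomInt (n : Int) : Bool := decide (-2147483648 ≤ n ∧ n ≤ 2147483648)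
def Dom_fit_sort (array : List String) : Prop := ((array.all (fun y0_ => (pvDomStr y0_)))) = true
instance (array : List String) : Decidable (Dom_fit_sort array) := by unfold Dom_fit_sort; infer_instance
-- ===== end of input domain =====

-- B replaces A's O(n^2) bubble sort by a stable key-bucket sort: group by '1'-count, emit groups by descending count.
-- Both Pythons mutate `array` in place and return it; the equivalence proved here is about the return value.

-- ===== PORT A =====
def cal_fitness (a : String) : Nat := PySem.Str.count a "1"

-- the inner loop `for j in range(len(array)-1)` of A: one adjacent-swap pass over the list
def bubblePass : List String → List String
  | [] => []
  | [x] => [x]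
  | x :: y :: t =>
      if cal_fitness x < cal_fitness y then y :: bubblePass (x :: t)
      else x :: bubblePass (y :: t)
termination_by l => l.length

def fit_sort (array : List String) : List String :=
  (List.range array.length).foldl (fun acc _ => bubblePass acc) array

-- ===== PORT B =====
def fit_sort_alt (array : List String) : List String :=
  let keys := PySem.List.sorted (PySem.Set.ofList (array.map (fun s => PySem.Str.count s "1"))) (fun x => x) true
  keys.flatMap (fun k => array.filter (fun s => PySem.Str.count s "1" == k))

-- ===== PRECONDITION & SPEC =====
def Spec_fit_sort (array : List String) (out : List String) : Prop := out = fit_sort_alt array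
instance (array : List String) (out : List String) : Decidable (Spec_fit_sort array out) := by unfold Spec_fit_sort; infer_instance

-- ===== CLAIM (what is proved, stated in full; the proofs are below) =====
def Claim_equal_fit_sort : Prop := ∀ (array : List String), Dom_fit_sort array → Spec_fit_sort array (fit_sort array)

-- ===== LEMMAS AND PROOFS =====

-- We lift both programs to lists of (string, original index) pairs and compare through the
-- injective measure pvM: descending '1'-count, ties broken by ascending original index.
def pvM (K N : Nat) (p : String × Nat) : Nat := (K - cal_fitness p.1) * N + p.2

-- the bubble pass on pairs, driven by the measure
def passP (K N : Nat) : List (String × Nat) → List (String × Nat)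
  | [] => []
  | [p] => [p]
  | p :: q :: t =>
      if pvM K N q < pvM K N p then q :: passP K N (p :: t)
      else p :: passP K N (q :: t)
termination_by l => l.length

lemma passP_cons_cons (K N : Nat) (p q : String × Nat) (t : List (String × Nat)) :
    passP K N (p :: q :: t)
      = if pvM K N q < pvM K N p then q :: passP K N (p :: t)
        else p :: passP K N (q :: t) := by
  rw [passP]

lemma pvM_lt (K N a b i j : Nat) (hb : b ≤ K) (hj : j < N) (hab : a < b) :
    (K - b) * N + j < (K - a) * N + i := by
  have h1 : K - b + 1 ≤ K - a := by omega
  calc (K - b) * N + j < (K - b) * N + N := by omega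
    _ = (K - b + 1) * N := by ring
    _ ≤ (K - a) * N := Nat.mul_le_mul_right N h1
    _ ≤ (K - a) * N + i := Nat.le_add_right _ _

lemma pvM_cond_iff (K N : Nat) (p q : String × Nat)
    (hp : cal_fitness p.1 ≤ K) (hq : cal_fitness q.1 ≤ K)
    (hpN : p.2 < N) (hqN : q.2 < N)
    (hij : cal_fitness p.1 = cal_fitness q.1 → p.2 < q.2) :
    (cal_fitness p.1 < cal_fitness q.1) ↔ (pvM K N q < pvM K N p) := by
  unfold pvM
  rcases Nat.lt_trichotomy (cal_fitness p.1) (cal_fitness q.1) with h | h | h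
  · have := pvM_lt K N (cal_fitness p.1) (cal_fitness q.1) p.2 q.2 hq hqN h
    exact ⟨fun _ => this, fun _ => h⟩
  · rw [h]; omega
  · have := pvM_lt K N (cal_fitness q.1) (cal_fitness p.1) q.2 p.2 hp hpN h
    omega

lemma pvM_ne (K N : Nat) (p q : String × Nat)
    (hp : cal_fitness p.1 ≤ K) (hq : cal_fitness q.1 ≤ K)
    (hpN : p.2 < N) (hqN : q.2 < N) (hidx : p.2 ≠ q.2) :
    pvM K N p ≠ pvM K N q := by
  rcases Nat.lt_trichotomy (cal_fitness p.1) (cal_fitness q.1) with h | h | h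
  · have := pvM_lt K N (cal_fitness p.1) (cal_fitness q.1) p.2 q.2 hq hqN h
    unfold pvM; omega
  · unfold pvM; rw [h]; omega
  · have := pvM_lt K N (cal_fitness q.1) (cal_fitness p.1) q.2 p.2 hp hpN h
    unfold pvM; omega

lemma passP_perm (K N : Nat) (l : List (String × Nat)) : (passP K N l).Perm l := by
  induction l using passP.induct K N with
  | case1 => simp [passP]
  | case2 p => simp [passP]
  | case3 p q t h ih =>
      rw [passP_cons_cons, if_pos h]
      exact (ih.cons q).trans (List.Perm.swap p q t)
  | case4 p q t h ih =>
      rw [passP_cons_cons, if_neg h]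
      exact ih.cons p

lemma passP_mem (K N : Nat) (l : List (String × Nat)) (p : String × Nat)
    (h : p ∈ passP K N l) : p ∈ l := (passP_perm K N l).mem_iff.mp h

lemma passP_eq_of_pairwise_lt (K N : Nat) (l : List (String × Nat))
    (h : l.Pairwise (fun a b => pvM K N a < pvM K N b)) : passP K N l = l := by
  induction l using passP.induct K N with
  | case1 => simp [passP]
  | case2 p => simp [passP]
  | case3 p q t hc ih =>
      have := (List.pairwise_cons.mp h).1 q (by simp)
      exact absurd hc (by omega)
  | case4 p q t hc ih =>
      rw [passP_cons_cons, if_neg hc, ih (List.pairwise_cons.mp h).2]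

lemma passP_append (K N : Nat) (f b : List (String × Nat))
    (hcross : ∀ x ∈ f, ∀ y ∈ b, pvM K N x < pvM K N y)
    (hb : b.Pairwise (fun a c => pvM K N a < pvM K N c)) :
    passP K N (f ++ b) = passP K N f ++ b := by
  induction f using passP.induct K N with
  | case1 => simpa [passP] using passP_eq_of_pairwise_lt K N b hb
  | case2 p =>
      cases b with
      | nil => simp
      | cons y b' =>
          have hpy : pvM K N p < pvM K N y := hcross p (by simp) y (by simp)
          simp only [List.singleton_append]
          have hny : ¬ pvM K N y < pvM K N p := by omega
          rw [passP_cons_cons, if_neg hny,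
            passP_eq_of_pairwise_lt K N (y :: b') hb]
          simp [passP]
  | case3 p q t h ih =>
      have ihe := ih (fun x hx y hy => hcross x (by simp at hx ⊢; tauto) y hy)
      simp only [List.cons_append] at ihe ⊢
      rw [passP_cons_cons, if_pos h, passP, if_pos h, ihe]
      simp
  | case4 p q t h ih =>
      have ihe := ih (fun x hx y hy => hcross x (by simp at hx ⊢; tauto) y hy)
      simp only [List.cons_append] at ihe ⊢
      rw [passP_cons_cons, if_neg h, passP, if_neg h, ihe]
      simp

lemma passP_last (K N : Nat) (f : List (String × Nat)) (hne : f ≠ [])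
    (hpw : f.Pairwise (fun a b => pvM K N a ≠ pvM K N b)) :
    ∃ g m, passP K N f = g ++ [m] ∧ ∀ x ∈ g, pvM K N x < pvM K N m := by
  induction f using passP.induct K N with
  | case1 => exact absurd rfl hne
  | case2 p => exact ⟨[], p, by simp [passP], by simp⟩
  | case3 p q t h ih =>
      obtain ⟨g, m, e, hmax⟩ := ih (by simp)
        (List.Pairwise.sublist (List.Sublist.cons₂ p (List.sublist_cons_self q t)) hpw)
      have hpm : pvM K N p ≤ pvM K N m := by
        have hp : p ∈ g ++ [m] := by
          rw [← e]
          exact (passP_perm K N (p :: t)).mem_iff.mpr (by simp)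
        rcases List.mem_append.mp hp with hp | hp
        · exact le_of_lt (hmax p hp)
        · simp at hp; rw [hp]
      refine ⟨q :: g, m, ?_, ?_⟩
      · rw [passP_cons_cons, if_pos h, e]; rfl
      · intro x hx
        rcases List.mem_cons.mp hx with rfl | hx
        · omega
        · exact hmax x hx
  | case4 p q t h ih =>
      have hpq : pvM K N p < pvM K N q := by
        have := (List.pairwise_cons.mp hpw).1 q (by simp)
        omega
      obtain ⟨g, m, e, hmax⟩ := ih (by simp)
        (List.Pairwise.sublist (List.sublist_cons_self p (q :: t)) hpw)
      have hqm : pvM K N q ≤ pvM K N m := by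
        have hq : q ∈ g ++ [m] := by
          rw [← e]
          exact (passP_perm K N (q :: t)).mem_iff.mpr (by simp)
        rcases List.mem_append.mp hq with hq | hq
        · exact le_of_lt (hmax q hq)
        · simp at hq; rw [hq]
      refine ⟨p :: g, m, ?_, ?_⟩
      · rw [passP_cons_cons, if_neg h, e]; rfl
      · intro x hx
        rcases List.mem_cons.mp hx with rfl | hx
        · omega
        · exact hmax x hx

lemma passP_pairwise_ne (K N : Nat) (l : List (String × Nat))
    (h : l.Pairwise (fun a b => pvM K N a ≠ pvM K N b)) :
    (passP K N l).Pairwise (fun a b => pvM K N a ≠ pvM K N b) := by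
  refine ((passP_perm K N l).pairwise_iff ?_).mpr h
  intro a b hab
  exact fun he => hab he.symm

-- sorted-suffix invariant of bubble sort: after n passes the last n elements are in final position
def SPd (K N n : Nat) (l : List (String × Nat)) : Prop :=
  ∃ f b, l = f ++ b ∧ min n l.length ≤ b.length ∧
    b.Pairwise (fun a c => pvM K N a < pvM K N c) ∧
    ∀ x ∈ f, ∀ y ∈ b, pvM K N x < pvM K N y

lemma spd_step (K N n : Nat) (l : List (String × Nat))
    (h : SPd K N n l) (hne : l.Pairwise (fun a b => pvM K N a ≠ pvM K N b)) :
    SPd K N (n + 1) (passP K N l) := by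
  obtain ⟨f, b, rfl, hlen, hb, hcross⟩ := h
  by_cases hf : f = []
  · subst hf
    rw [List.nil_append] at hlen ⊢
    rw [passP_eq_of_pairwise_lt K N b hb]
    exact ⟨[], b, rfl, by simp, hb, by simp⟩
  · rw [passP_append K N f b hcross hb]
    obtain ⟨g, m, e, hmax⟩ :=
      passP_last K N f hf (List.pairwise_append.mp hne).1
    have hmem : ∀ x ∈ g ++ [m], x ∈ f := by
      intro x hx
      rw [← e] at hx
      exact (passP_perm K N f).mem_iff.mp hx
    have hlf : g.length + 1 = f.length := by
      have := (e ▸ passP_perm K N f).length_eq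
      simpa using this
    have hfpos : 1 ≤ f.length := by
      cases f with
      | nil => exact absurd rfl hf
      | cons _ _ => simp
    rw [e]
    refine ⟨g, m :: b, by simp, ?_, ?_, ?_⟩
    · simp only [List.length_append, List.length_cons] at hlen ⊢
      omega
    · refine List.pairwise_cons.mpr ⟨?_, hb⟩
      intro y hy
      exact hcross m (hmem m (by simp)) y hy
    · intro x hx y hy
      have hxf : x ∈ f := hmem x (List.mem_append.mpr (Or.inl hx))
      rcases List.mem_cons.mp hy with rfl | hy
      · exact hmax x hx
      · exact hcross x hxf y hy

lemma passP_iter_ne (K N : Nat) (l : List (String × Nat))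
    (hne : l.Pairwise (fun a b => pvM K N a ≠ pvM K N b)) (k : Nat) :
    ((passP K N)^[k] l).Pairwise (fun a b => pvM K N a ≠ pvM K N b) := by
  induction k with
  | zero => exact hne
  | succ k ih =>
      rw [Function.iterate_succ_apply']
      exact passP_pairwise_ne K N _ ih

lemma spd_iter (K N : Nat) (l : List (String × Nat))
    (hne : l.Pairwise (fun a b => pvM K N a ≠ pvM K N b)) (k : Nat) :
    SPd K N k ((passP K N)^[k] l) := by
  induction k with
  | zero => exact ⟨l, [], by simp, by simp, by simp, by simp⟩
  | succ k ih =>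
      rw [Function.iterate_succ_apply']
      exact spd_step K N k _ ih (passP_iter_ne K N l hne k)

lemma passP_iter_perm (K N : Nat) (l : List (String × Nat)) (k : Nat) :
    ((passP K N)^[k] l).Perm l := by
  induction k with
  | zero => rfl
  | succ k ih =>
      rw [Function.iterate_succ_apply']
      exact (passP_perm K N _).trans ih

lemma passP_iter_pairwise (K N : Nat) (l : List (String × Nat))
    (hne : l.Pairwise (fun a b => pvM K N a ≠ pvM K N b)) :
    ((passP K N)^[l.length] l).Pairwise (fun a c => pvM K N a < pvM K N c) := by
  obtain ⟨f, b, e, hlen, hb, hcross⟩ := spd_iter K N l hne l.length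
  have hlen2 : f.length + b.length = l.length := by
    have := (e ▸ passP_iter_perm K N l l.length).length_eq
    simpa using this
  have hf : f = [] := by
    rw [e, List.length_append] at hlen
    have : f.length = 0 := by omega
    exact List.eq_nil_of_length_eq_zero this
  rw [e, hf, List.nil_append]
  exact hb

-- projection: `passP` on pairs projects to A's string pass (needs the key/index invariant)
lemma passP_proj (K N : Nat) (l : List (String × Nat))
    (hb : ∀ p ∈ l, cal_fitness p.1 ≤ K ∧ p.2 < N)
    (hpw : l.Pairwise (fun p q => cal_fitness p.1 = cal_fitness q.1 → p.2 < q.2)) :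
    (passP K N l).map Prod.fst = bubblePass (l.map Prod.fst) := by
  induction l using passP.induct K N with
  | case1 => simp [passP, bubblePass]
  | case2 p => simp [passP, bubblePass]
  | case3 p q t h ih =>
      have hcond : cal_fitness p.1 < cal_fitness q.1 :=
        (pvM_cond_iff K N p q (hb p (by simp)).1 (hb q (by simp)).1
          (hb p (by simp)).2 (hb q (by simp)).2
          ((List.pairwise_cons.mp hpw).1 q (by simp))).mpr h
      rw [passP_cons_cons, if_pos h]
      show q.1 :: (passP K N (p :: t)).map Prod.fst
        = bubblePass (p.1 :: q.1 :: t.map Prod.fst)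
      rw [bubblePass, if_pos hcond,
        ih (fun x hx => hb x (by simp at hx ⊢; tauto))
          (List.Pairwise.sublist (List.Sublist.cons₂ p (List.sublist_cons_self q t)) hpw)]
      rfl
  | case4 p q t h ih =>
      have hcond : ¬ cal_fitness p.1 < cal_fitness q.1 := fun hc =>
        h ((pvM_cond_iff K N p q (hb p (by simp)).1 (hb q (by simp)).1
          (hb p (by simp)).2 (hb q (by simp)).2
          ((List.pairwise_cons.mp hpw).1 q (by simp))).mp hc)
      rw [passP_cons_cons, if_neg h]
      show p.1 :: (passP K N (q :: t)).map Prod.fst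
        = bubblePass (p.1 :: q.1 :: t.map Prod.fst)
      rw [bubblePass, if_neg hcond,
        ih (fun x hx => hb x (by simp at hx ⊢; tauto))
          (List.Pairwise.sublist (List.sublist_cons_self p (q :: t)) hpw)]
      rfl

lemma passP_keyrel (K N : Nat) (l : List (String × Nat))
    (hpw : l.Pairwise (fun p q => cal_fitness p.1 = cal_fitness q.1 → p.2 < q.2)) :
    (passP K N l).Pairwise (fun p q => cal_fitness p.1 = cal_fitness q.1 → p.2 < q.2) := by
  induction l using passP.induct K N with
  | case1 => simp [passP]
  | case2 p => simp [passP]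
  | case3 p q t h ih =>
      rw [passP_cons_cons, if_pos h]
      refine List.Pairwise.cons ?_
        (ih (List.Pairwise.sublist (List.Sublist.cons₂ p (List.sublist_cons_self q t)) hpw))
      intro r hr
      rcases List.mem_cons.mp (passP_mem K N _ r hr) with rfl | hr
      · intro hcq
        unfold pvM at h
        rw [hcq] at h
        omega
      · exact ((List.pairwise_cons.mp (List.pairwise_cons.mp hpw).2).1) r hr
  | case4 p q t h ih =>
      rw [passP_cons_cons, if_neg h]
      refine List.Pairwise.cons ?_
        (ih (List.Pairwise.sublist (List.sublist_cons_self p (q :: t)) hpw))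
      intro r hr
      exact (List.pairwise_cons.mp hpw).1 r (passP_mem K N _ r hr)

lemma passP_iter_proj (K N : Nat) (k : Nat) (l : List (String × Nat))
    (hb : ∀ p ∈ l, cal_fitness p.1 ≤ K ∧ p.2 < N)
    (hpw : l.Pairwise (fun p q => cal_fitness p.1 = cal_fitness q.1 → p.2 < q.2)) :
    ((passP K N)^[k] l).map Prod.fst = bubblePass^[k] (l.map Prod.fst) := by
  induction k generalizing l with
  | zero => rfl
  | succ k ih =>
      rw [Function.iterate_succ_apply, Function.iterate_succ_apply,
        ← passP_proj K N l hb hpw]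
      exact ih (passP K N l)
        (fun p hp => hb p (passP_mem K N l p hp))
        (passP_keyrel K N l hpw)

lemma foldl_range_iterate {α : Type} (f : α → α) (n : Nat) (init : α) :
    (List.range n).foldl (fun acc _ => f acc) init = f^[n] init := by
  induction n with
  | zero => rfl
  | succ n ih =>
      rw [List.range_succ, List.foldl_append, ih, Function.iterate_succ_apply']
      rfl

-- zipIdx facts
lemma zipIdx_pairwise_idx {α : Type} (l : List α) (k : Nat) :
    (l.zipIdx k).Pairwise (fun p q => p.2 < q.2) := by
  induction l generalizing k with
  | nil => simp
  | cons x t ih =>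
      rw [List.zipIdx_cons]
      refine List.Pairwise.cons ?_ (ih (k + 1))
      rintro ⟨a, i⟩ hmem
      have := (List.mem_zipIdx hmem).1
      simpa using by omega

lemma zipIdx_bounds {α : Type} (l : List α) (p : α × Nat) (h : p ∈ l.zipIdx) :
    p.1 ∈ l ∧ p.2 < l.length := by
  obtain ⟨a, i⟩ := p
  obtain ⟨-, h2, h3⟩ := List.mem_zipIdx h
  refine ⟨?_, by simpa using h2⟩
  rw [h3]
  exact List.getElem_mem _

-- B-side: the flatMap of key-buckets is a permutation of the list
lemma flatMap_filter_perm (ks : List Nat) (L : List (String × Nat))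
    (hnd : ks.Nodup) (hall : ∀ p ∈ L, cal_fitness p.1 ∈ ks) :
    (ks.flatMap (fun k => L.filter (fun p => cal_fitness p.1 == k))).Perm L := by
  induction ks generalizing L with
  | nil =>
      cases L with
      | nil => simp
      | cons p t => exact absurd (hall p (by simp)) (by simp)
  | cons k ks ih =>
      rw [List.flatMap_cons]
      have hcong : ∀ k' ∈ ks,
          L.filter (fun p => cal_fitness p.1 == k')
          = (L.filter (fun p => !(cal_fitness p.1 == k))).filter
              (fun p => cal_fitness p.1 == k') := by
        intro k' hk'
        have hkk : k' ≠ k := by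
          rintro rfl
          exact (List.nodup_cons.mp hnd).1 hk'
        rw [List.filter_filter]
        apply List.filter_congr
        intro p _
        by_cases hc : cal_fitness p.1 = k' <;> simp [hc, hkk]
      have he := List.flatMap_congr hcong
      have ihres := ih (L.filter (fun p => !(cal_fitness p.1 == k)))
        (List.nodup_cons.mp hnd).2
        (by
          intro p hp
          have hpL : p ∈ L := List.mem_of_mem_filter hp
          have hne : ¬ (cal_fitness p.1 == k) = true := by
            have := (List.mem_filter.mp hp).2
            simpa using this
          have := hall p hpL
          rcases List.mem_cons.mp this with hk | hk
          · exact absurd (by simp [hk]) hne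
          · exact hk)
      refine List.Perm.trans ?_
        (List.filter_append_perm (fun p => cal_fitness p.1 == k) L)
      rw [he]
      exact List.Perm.append_left _ ihres

lemma fit_main (array : List String) : fit_sort array = fit_sort_alt array := by
  set K := array.foldl (fun acc s => max acc (cal_fitness s)) 0 with hK
  set N := array.length with hN
  set L := array.zipIdx with hL
  set ks := PySem.List.sorted (PySem.Set.ofList (array.map (fun s => PySem.Str.count s "1")))
    (fun x => x) true with hks
  have hLlen : L.length = N := by simp [hL, hN]
  have hbounds : ∀ p ∈ L, cal_fitness p.1 ≤ K ∧ p.2 < N := by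
    intro p hp
    obtain ⟨h1, h2⟩ := zipIdx_bounds array p hp
    exact ⟨(PySem.List.le_foldl_max_nat array cal_fitness 0).2 p.1 h1, h2⟩
  have hidx : L.Pairwise (fun p q => p.2 < q.2) := zipIdx_pairwise_idx array 0
  have hkeyrel : L.Pairwise (fun p q => cal_fitness p.1 = cal_fitness q.1 → p.2 < q.2) :=
    hidx.imp (fun {p q} h (_ : cal_fitness p.1 = cal_fitness q.1) => h)
  have hne : L.Pairwise (fun a b => pvM K N a ≠ pvM K N b) :=
    hidx.imp_of_mem (fun {a b} ha hb h =>
      pvM_ne K N a b (hbounds a ha).1 (hbounds b hb).1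
        (hbounds a ha).2 (hbounds b hb).2 (Nat.ne_of_lt h))
  -- A's result is the lifted bubble sort, projected back to strings
  have hA : fit_sort array = ((passP K N)^[N] L).map Prod.fst := by
    unfold fit_sort
    rw [foldl_range_iterate, passP_iter_proj K N N L hbounds hkeyrel, List.zipIdx_map_fst]
  have hApw := passP_iter_pairwise K N L hne
  rw [hLlen] at hApw
  have hsortA : PySem.List.sorted L (pvM K N) = (passP K N)^[N] L :=
    PySem.List.sorted_eq_of_perm_of_pairwise_lt L _ (pvM K N) (passP_iter_perm K N L N) hApw
  -- B's result is the bucket concatenation, which carries the same order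
  have hks_nodup : ks.Nodup :=
    (PySem.List.sorted_perm _ _ true).nodup_iff.mpr (PySem.Set.nodup_ofList _)
  have hks_gt : ks.Pairwise (fun a b => b < a) :=
    (List.Pairwise.and (PySem.List.sorted_pairwise_rev _ _) hks_nodup).imp
      (fun h => lt_of_le_of_ne h.1 (Ne.symm h.2))
  have hks_mem : ∀ p ∈ L, cal_fitness p.1 ∈ ks := by
    intro p hp
    rw [hks, PySem.List.mem_sorted, PySem.Set.mem_ofList]
    exact List.mem_map.mpr ⟨p.1, (zipIdx_bounds array p hp).1, rfl⟩
  have hBperm : (ks.flatMap (fun k => L.filter (fun p => cal_fitness p.1 == k))).Perm L :=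
    flatMap_filter_perm ks L hks_nodup hks_mem
  have hBpw : (ks.flatMap (fun k => L.filter (fun p => cal_fitness p.1 == k))).Pairwise
      (fun a b => pvM K N a < pvM K N b) := by
    rw [List.pairwise_flatMap]
    constructor
    · intro k _
      refine List.Pairwise.imp_of_mem ?_ (hidx.filter _)
      intro a b ha hb hab
      have hka : cal_fitness a.1 = k := by simpa using (List.mem_filter.mp ha).2
      have hkb : cal_fitness b.1 = k := by simpa using (List.mem_filter.mp hb).2
      unfold pvM
      rw [hka, hkb]
      omega
    · refine hks_gt.imp ?_
      intro k1 k2 h12 x hx y hy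
      have hxL := List.mem_of_mem_filter hx
      have hyL := List.mem_of_mem_filter hy
      have hkx : cal_fitness x.1 = k1 := by simpa using (List.mem_filter.mp hx).2
      have hky : cal_fitness y.1 = k2 := by simpa using (List.mem_filter.mp hy).2
      have := pvM_lt K N k2 k1 y.2 x.2 (hkx ▸ (hbounds x hxL).1) (hbounds x hxL).2 h12
      unfold pvM
      rw [hkx, hky]
      exact this
  have hsortB : PySem.List.sorted L (pvM K N)
      = ks.flatMap (fun k => L.filter (fun p => cal_fitness p.1 == k)) :=
    PySem.List.sorted_eq_of_perm_of_pairwise_lt L _ (pvM K N) hBperm hBpw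
  -- both sides are the (unique) strictly pvM-increasing rearrangement of L
  rw [hA, hsortA.symm.trans hsortB]
  show (ks.flatMap (fun k => L.filter (fun p => cal_fitness p.1 == k))).map Prod.fst
    = fit_sort_alt array
  rw [List.map_flatMap]
  unfold fit_sort_alt
  refine List.flatMap_congr ?_
  intro k _
  conv_rhs => rw [← List.zipIdx_map_fst 0 array]
  rw [List.filter_map]
  rfl

-- ===== VERDICT (by name: the statement is the Claim_ definition above) =====
theorem fit_sort_spec : Claim_equal_fit_sort := by
  intro array _
  exact fit_main array
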